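-- pv_equiv track=rewrite | github.com/Modern-Compilers-Lab/Quantum-Compiler | qlosure/src/mapping/heuristic.py | get_all_predecessors
-- ===== SOURCE A (Python) =====
-- def get_all_predecessors(node, predecessors, visited=None):
--     if visited is None:
--         visited = set()
--     if node in visited:
--         return set()
--     visited.add(node)
--     preds = set(predecessors.get(node, []))
--     for p in predecessors.get(node, []):
--         preds |= get_all_predecessors(p, predecessors, visited)
--     return preds
-- ===== SOURCE B (Python) =====
-- def get_all_predecessors(node, predecessors, visited=None):
--     """Iterative DFS with an explicit stack instead of recursion."""
--     if visited is None:
--         visited = set()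
--     if node in visited:
--         return set()
--     result = set()
--     stack = [node]
--     while stack:
--         u = stack.pop()
--         if u in visited:
--             continue
--         visited.add(u)
--         children = predecessors.get(u, [])
--         result |= set(children)
--         stack.extend(reversed(children))
--     return result
-- ===== Notes on version B (the rewrite author's own statement) =====
-- stated objective: alternative
-- what changed: The recursive DFS (recursion per predecessor, unioning recursively returned sets) is replaced by an iterative worklist traversal with an explicit stack and a single result set accumulated in one loop.
import Mathlib
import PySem

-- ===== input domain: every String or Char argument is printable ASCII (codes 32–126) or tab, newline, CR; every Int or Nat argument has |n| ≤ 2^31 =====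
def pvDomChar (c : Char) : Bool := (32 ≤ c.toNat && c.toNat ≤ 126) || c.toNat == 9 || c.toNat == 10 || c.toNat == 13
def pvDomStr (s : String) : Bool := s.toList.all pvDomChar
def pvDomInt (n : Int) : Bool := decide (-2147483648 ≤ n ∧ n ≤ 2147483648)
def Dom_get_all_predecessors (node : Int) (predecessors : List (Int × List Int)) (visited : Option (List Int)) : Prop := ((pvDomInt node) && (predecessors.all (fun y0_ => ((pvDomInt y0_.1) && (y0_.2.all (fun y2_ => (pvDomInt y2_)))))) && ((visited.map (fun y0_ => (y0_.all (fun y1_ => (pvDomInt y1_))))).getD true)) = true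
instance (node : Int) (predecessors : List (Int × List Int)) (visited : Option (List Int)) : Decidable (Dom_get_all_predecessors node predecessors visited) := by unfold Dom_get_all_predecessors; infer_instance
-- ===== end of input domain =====

-- B replaces A's recursive DFS by an iterative explicit-stack traversal (alternative
-- decomposition, same cost). Both Pythons mutate the caller's `visited` set identically;
-- the equivalence proved here is about the RETURN value.

-- Termination measure shared by both ports: how many dict keys are not yet visited.
def pvUnvisited (predecessors : List (Int × List Int)) (vis : List Int) : Nat :=
  ((predecessors.map Prod.fst).filter (fun k => !(PySem.Set.contains vis k))).length

-- helper facts the ports' termination proofs cite by name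
theorem pvFilter_le (ks vis : List Int) (p : Int) :
    ((ks.filter (fun k => !(PySem.Set.contains (PySem.Set.add vis p) k))).length)
      ≤ (ks.filter (fun k => !(PySem.Set.contains vis k))).length := by
  simp only [← List.countP_eq_length_filter]
  apply List.countP_mono_left
  intro a _ h
  simp [PySem.Set.mem_add] at h ⊢
  tauto

theorem pvUnvisited_add_le (pred : List (Int × List Int)) (vis : List Int) (p : Int) :
    pvUnvisited pred (PySem.Set.add vis p) ≤ pvUnvisited pred vis :=
  pvFilter_le (pred.map Prod.fst) vis p

theorem pvFilter_lt (ks vis : List Int) (p : Int) (hk : p ∈ ks)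
    (hp : PySem.Set.contains vis p = false) :
    ((ks.filter (fun k => !(PySem.Set.contains (PySem.Set.add vis p) k))).length)
      < (ks.filter (fun k => !(PySem.Set.contains vis k))).length := by
  obtain ⟨l1, l2, rfl⟩ := List.append_of_mem hk
  have h1 := pvFilter_le l1 vis p
  have h2 := pvFilter_le l2 vis p
  have e1 : (!(PySem.Set.contains (PySem.Set.add vis p) p)) = false := by
    simp [PySem.Set.mem_add]
  have e2 : (!(PySem.Set.contains vis p)) = true := by
    simp only [hp, Bool.not_false]
  rw [List.filter_append, List.filter_append, List.length_append, List.length_append,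
    List.filter_cons, List.filter_cons, e1, e2]
  simp at h1 h2 ⊢
  omega

theorem pvUnvisited_add_lt (pred : List (Int × List Int)) (vis : List Int) (p : Int)
    (hk : p ∈ pred.map Prod.fst) (hp : PySem.Set.contains vis p = false) :
    pvUnvisited pred (PySem.Set.add vis p) < pvUnvisited pred vis :=
  pvFilter_lt (pred.map Prod.fst) vis p hk hp

theorem pvGetD_nil (pred : List (Int × List Int)) (p : Int)
    (hk : p ∉ pred.map Prod.fst) : PySem.Dict.getD ⟨pred⟩ p [] = [] := by
  have h : PySem.Dict.get? (⟨pred⟩ : PySem.Dict Int (List Int)) p = none :=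
    (PySem.Dict.get?_eq_none_iff_not_mem_keys _ _).2 (by simpa [PySem.Dict.keys] using hk)
  simp [PySem.Dict.getD, h]

-- ===== PORT A =====
-- A's recursion: the body after `visited.add(node)` is the loop
-- `for p in predecessors.get(node, []): preds |= get_all_predecessors(p, …)`;
-- getAllPredsA processes that list of predecessors carrying (preds, visited); the
-- callee's `if node in visited: return set()` check appears at each loop step.
-- The subtype part only records "visited never shrinks the measure", for termination.
def getAllPredsA (pred : List (Int × List Int)) :
    (ps : List Int) → (acc : PySem.Set Int) → (vis : PySem.Set Int) →
    {out : (PySem.Set Int) × (PySem.Set Int) //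
      pvUnvisited pred out.2 ≤ pvUnvisited pred vis}
  | [], acc, vis => ⟨(acc, vis), Nat.le_refl _⟩
  | p :: rest, acc, vis =>
    if hp : PySem.Set.contains vis p then
      -- the recursive call returns set(); `preds |= set()` leaves preds unchanged
      getAllPredsA pred rest (PySem.Set.union acc PySem.Set.empty) vis
    else
      -- callee: visited.add(p); its preds = set(children); recurse over children
      let vis1 := PySem.Set.add vis p
      let ch := PySem.Dict.getD ⟨pred⟩ p []
      match getAllPredsA pred ch (PySem.Set.ofList ch) vis1 with
      | ⟨(r, vis2), h2⟩ =>
        match getAllPredsA pred rest (PySem.Set.union acc r) vis2 with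
        | ⟨out, h3⟩ =>
          ⟨out, Nat.le_trans h3 (Nat.le_trans h2 (pvUnvisited_add_le pred vis p))⟩
  termination_by ps _ vis => (pvUnvisited pred vis, ps.length)
  decreasing_by
  · exact Prod.Lex.right _ (Nat.lt_succ_self _)
  · by_cases hk : p ∈ pred.map Prod.fst
    · exact Prod.Lex.left _ _ (pvUnvisited_add_lt pred vis p hk (by simpa using hp))
    · have hch : PySem.Dict.getD ⟨pred⟩ p [] = [] := pvGetD_nil pred p hk
      rw [hch]
      have hle := pvUnvisited_add_le pred vis p
      rcases Nat.lt_or_ge (pvUnvisited pred (PySem.Set.add vis p)) (pvUnvisited pred vis) with h | h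
      · exact Prod.Lex.left _ _ h
      · have heq : pvUnvisited pred (PySem.Set.add vis p) = pvUnvisited pred vis :=
          Nat.le_antisymm hle h
        rw [heq]
        exact Prod.Lex.right _ (Nat.succ_pos _)
  · rcases Nat.lt_or_ge (pvUnvisited pred vis2) (pvUnvisited pred vis) with h | h
    · exact Prod.Lex.left _ _ h
    · have heq : pvUnvisited pred vis2 = pvUnvisited pred vis :=
        Nat.le_antisymm (Nat.le_trans h2 (pvUnvisited_add_le pred vis p)) h
      rw [heq]
      exact Prod.Lex.right _ (Nat.lt_succ_self _)

def get_all_predecessors (node : Int) (predecessors : List (Int × List Int)) (visited : Option (List Int)) : List Int :=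
  let vis : PySem.Set Int := visited.getD PySem.Set.empty     -- if visited is None: visited = set()
  if PySem.Set.contains vis node then PySem.Set.empty          -- if node in visited: return set()
  else
    let vis1 := PySem.Set.add vis node                         -- visited.add(node)
    let ch := PySem.Dict.getD ⟨predecessors⟩ node []             -- predecessors.get(node, [])
    (getAllPredsA predecessors ch (PySem.Set.ofList ch) vis1).1.1

-- ===== PORT B =====
-- the while loop; the stack is modeled top-first (Python pops from the END of the list
-- and extends with reversed(children), i.e. children in order at the top = `ch ++ rest`).
def getAllPredsBLoop (pred : List (Int × List Int)) (vis : PySem.Set Int)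
    (result : PySem.Set Int) (stack : List Int) : (PySem.Set Int) × (PySem.Set Int) :=
  match stack with
  | [] => (result, vis)
  | u :: rest =>
    if hp : PySem.Set.contains vis u then
      getAllPredsBLoop pred vis result rest                    -- if u in visited: continue
    else
      let vis1 := PySem.Set.add vis u                          -- visited.add(u)
      let ch := PySem.Dict.getD ⟨pred⟩ u []                      -- predecessors.get(u, [])
      getAllPredsBLoop pred vis1 (PySem.Set.union result (PySem.Set.ofList ch)) (ch ++ rest)
  termination_by (pvUnvisited pred vis, stack.length)
  decreasing_by
  · exact Prod.Lex.right _ (Nat.lt_succ_self _)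
  · by_cases hk : u ∈ pred.map Prod.fst
    · exact Prod.Lex.left _ _ (pvUnvisited_add_lt pred vis u hk (by simpa using hp))
    · have hch : PySem.Dict.getD ⟨pred⟩ u [] = [] := pvGetD_nil pred u hk
      rw [hch]
      have hle := pvUnvisited_add_le pred vis u
      rcases Nat.lt_or_ge (pvUnvisited pred (PySem.Set.add vis u)) (pvUnvisited pred vis) with h | h
      · exact Prod.Lex.left _ _ h
      · have heq : pvUnvisited pred (PySem.Set.add vis u) = pvUnvisited pred vis :=
          Nat.le_antisymm hle h
        rw [heq]
        exact Prod.Lex.right _ (Nat.lt_succ_self _)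

def get_all_predecessors_alt (node : Int) (predecessors : List (Int × List Int)) (visited : Option (List Int)) : List Int :=
  let vis : PySem.Set Int := visited.getD PySem.Set.empty      -- if visited is None: visited = set()
  if PySem.Set.contains vis node then PySem.Set.empty           -- if node in visited: return set()
  else (getAllPredsBLoop predecessors vis PySem.Set.empty [node]).1

-- ===== PRECONDITION & SPEC =====
def Spec_get_all_predecessors (node : Int) (predecessors : List (Int × List Int)) (visited : Option (List Int)) (out : List Int) : Prop := out = get_all_predecessors_alt node predecessors visited
instance (node : Int) (predecessors : List (Int × List Int)) (visited : Option (List Int)) (out : List Int) : Decidable (Spec_get_all_predecessors node predecessors visited out) := by unfold Spec_get_all_predecessors; infer_instance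

-- ===== CLAIM (what is proved, stated in full; the proofs are below) =====
def Claim_equal_get_all_predecessors : Prop := ∀ (node : Int) (predecessors : List (Int × List Int)) (visited : Option (List Int)), Dom_get_all_predecessors node predecessors visited → Spec_get_all_predecessors node predecessors visited (get_all_predecessors node predecessors visited)

-- ===== LEMMAS AND PROOFS =====

theorem pv_union_empty {α : Type} [BEq α] (s : PySem.Set α) :
    PySem.Set.union s PySem.Set.empty = s := rfl

theorem pv_update_update {α : Type} [BEq α] [LawfulBEq α] (s t r : List α) :
    PySem.Set.update (PySem.Set.update s t) r = PySem.Set.update s (PySem.Set.update t r) := by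
  induction r generalizing t with
  | nil => rfl
  | cons x r ih =>
    rw [PySem.Set.update_cons, PySem.Set.update_cons, ← ih (PySem.Set.add t x)]
    congr 1
    by_cases hx : x ∈ t
    · rw [PySem.Set.add_of_mem hx,
        PySem.Set.add_of_mem ((PySem.Set.mem_update s t x).2 (Or.inr hx))]
    · rw [PySem.Set.add_of_not_mem hx, PySem.Set.update_append]
      rfl

theorem pv_union_assoc {α : Type} [BEq α] [LawfulBEq α] (s t r : List α) :
    PySem.Set.union (PySem.Set.union s t) r = PySem.Set.union s (PySem.Set.union t r) :=
  pv_update_update s t r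

-- value-level equations for the port of A
theorem gA_nil (pred : List (Int × List Int)) (acc vis : PySem.Set Int) :
    (getAllPredsA pred [] acc vis).1 = (acc, vis) := by
  rw [getAllPredsA]

theorem gA_cons_pos (pred : List (Int × List Int)) (p : Int) (rest : List Int)
    (acc vis : PySem.Set Int) (hp : PySem.Set.contains vis p = true) :
    (getAllPredsA pred (p :: rest) acc vis).1 = (getAllPredsA pred rest acc vis).1 := by
  rw [getAllPredsA]
  simp only [hp, reduceDIte, pv_union_empty]

theorem gA_cons_neg (pred : List (Int × List Int)) (p : Int) (rest : List Int)
    (acc vis : PySem.Set Int) (hp : PySem.Set.contains vis p = false) :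
    (getAllPredsA pred (p :: rest) acc vis).1 =
      (getAllPredsA pred rest
        (PySem.Set.union acc
          (getAllPredsA pred (PySem.Dict.getD ⟨pred⟩ p [])
            (PySem.Set.ofList (PySem.Dict.getD ⟨pred⟩ p [])) (PySem.Set.add vis p)).1.1)
        (getAllPredsA pred (PySem.Dict.getD ⟨pred⟩ p [])
          (PySem.Set.ofList (PySem.Dict.getD ⟨pred⟩ p [])) (PySem.Set.add vis p)).1.2).1 := by
  rw [getAllPredsA]
  simp only [hp, Bool.false_eq_true, reduceDIte]

-- value-level equations for the port of B
theorem gB_nil (pred : List (Int × List Int)) (vis result : PySem.Set Int) :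
    getAllPredsBLoop pred vis result [] = (result, vis) := by
  rw [getAllPredsBLoop]

theorem gB_cons_pos (pred : List (Int × List Int)) (vis result : PySem.Set Int)
    (u : Int) (rest : List Int) (hp : PySem.Set.contains vis u = true) :
    getAllPredsBLoop pred vis result (u :: rest) = getAllPredsBLoop pred vis result rest := by
  rw [getAllPredsBLoop]
  simp only [hp, reduceDIte]

theorem gB_cons_neg (pred : List (Int × List Int)) (vis result : PySem.Set Int)
    (u : Int) (rest : List Int) (hp : PySem.Set.contains vis u = false) :
    getAllPredsBLoop pred vis result (u :: rest) =
      getAllPredsBLoop pred (PySem.Set.add vis u)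
        (PySem.Set.union result (PySem.Set.ofList (PySem.Dict.getD ⟨pred⟩ u [])))
        (PySem.Dict.getD ⟨pred⟩ u [] ++ rest) := by
  rw [getAllPredsBLoop]
  simp only [hp, Bool.false_eq_true, reduceDIte]

-- acc-shift: A's fold with an enlarged accumulator = the enlargement ∪ the plain fold
theorem gA_shift (pred : List (Int × List Int)) (ps : List Int) :
    ∀ (s t vis : PySem.Set Int),
    (getAllPredsA pred ps (PySem.Set.union s t) vis).1
      = (PySem.Set.union s (getAllPredsA pred ps t vis).1.1,
         (getAllPredsA pred ps t vis).1.2) := by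
  induction ps with
  | nil => intro s t vis; rw [gA_nil, gA_nil]
  | cons p rest ih =>
    intro s t vis
    by_cases hp : PySem.Set.contains vis p
    · rw [gA_cons_pos pred p rest _ vis hp, gA_cons_pos pred p rest t vis hp]
      exact ih s t vis
    · have hp' : PySem.Set.contains vis p = false := by
        simpa using hp
      rw [gA_cons_neg pred p rest _ vis hp', gA_cons_neg pred p rest t vis hp']
      rw [pv_union_assoc]
      exact ih s _ _

-- the key simulation: running B's loop on `ps ++ rest` first performs exactly
-- A's fold over ps (same visited, same accumulated set), then continues with rest
theorem loop_sim (pred : List (Int × List Int)) :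
    ∀ (n : Nat) (ps rest : List Int) (acc vis : PySem.Set Int),
    pvUnvisited pred vis ≤ n →
    getAllPredsBLoop pred vis acc (ps ++ rest)
      = getAllPredsBLoop pred (getAllPredsA pred ps acc vis).1.2
          (getAllPredsA pred ps acc vis).1.1 rest := by
  intro n
  induction n using Nat.strong_induction_on with
  | _ n ihn =>
    intro ps
    induction ps with
    | nil =>
      intro rest acc vis _
      rw [List.nil_append, gA_nil]
    | cons p rest' ihp =>
      intro rest acc vis hn
      by_cases hp : PySem.Set.contains vis p
      · rw [List.cons_append, gB_cons_pos pred vis acc p _ hp,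
          gA_cons_pos pred p rest' acc vis hp]
        exact ihp rest acc vis hn
      · have hp' : PySem.Set.contains vis p = false := by simpa using hp
        rw [List.cons_append, gB_cons_neg pred vis acc p _ hp']
        rw [gA_cons_neg pred p rest' acc vis hp']
        set vis1 := PySem.Set.add vis p with hvis1
        set ch := PySem.Dict.getD ⟨pred⟩ p [] with hch
        have hle1 : pvUnvisited pred vis1 ≤ pvUnvisited pred vis :=
          pvUnvisited_add_le pred vis p
        by_cases hk : p ∈ pred.map Prod.fst
        · have hlt : pvUnvisited pred vis1 < pvUnvisited pred vis :=
            pvUnvisited_add_lt pred vis p hk hp'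
          have hstep := ihn (pvUnvisited pred vis1) (by omega) ch (rest' ++ rest)
            (PySem.Set.union acc (PySem.Set.ofList ch)) vis1 (Nat.le_refl _)
          rw [hstep, gA_shift]
          have hle2 : pvUnvisited pred
              (getAllPredsA pred ch (PySem.Set.ofList ch) vis1).1.2 ≤ n :=
            Nat.le_trans ((getAllPredsA pred ch (PySem.Set.ofList ch) vis1).2)
              (Nat.le_trans hle1 hn)
          exact ihp rest _ _ hle2
        · have hch0 : ch = [] := pvGetD_nil pred p hk
          rw [hch0]
          rw [gA_nil]
          simp only [List.nil_append]
          exact ihp rest acc vis1 (Nat.le_trans hle1 hn)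

-- ===== VERDICT (by name: the statement is the Claim_ definition above) =====
theorem get_all_predecessors_spec : Claim_equal_get_all_predecessors := by
  intro node predecessors visited _
  unfold Spec_get_all_predecessors get_all_predecessors get_all_predecessors_alt
  by_cases h : PySem.Set.contains (visited.getD PySem.Set.empty) node
  · simp only [h, reduceIte]
  · have h' : PySem.Set.contains (visited.getD PySem.Set.empty) node = false := by simpa using h
    simp only [h', Bool.false_eq_true, reduceIte]
    rw [gB_cons_neg _ _ _ _ _ h']
    set vis1 := PySem.Set.add (visited.getD PySem.Set.empty) node
    set ch := PySem.Dict.getD ⟨predecessors⟩ node []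
    have hacc : PySem.Set.union PySem.Set.empty (PySem.Set.ofList ch) = PySem.Set.ofList ch := by
      show PySem.Set.update ([] : List Int) (PySem.Set.ofList ch) = PySem.Set.ofList ch
      rw [PySem.Set.update_nil_left, PySem.Set.ofList_ofList]
    rw [hacc]
    have := loop_sim predecessors (pvUnvisited predecessors vis1) ch []
      (PySem.Set.ofList ch) vis1 (Nat.le_refl _)
    rw [List.append_nil] at this ⊢
    rw [this, gB_nil]
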